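-- pv_equiv track=rewrite | github.com/PavriLab/qcat | qcat/subread.py | splitByBarcodeChunk
-- ===== SOURCE A (Python) =====
-- def splitByBarcodeChunk(read, bcOrder, quality = None) :
--     curBc = ""
--
--     startList = list()
--     readList = list()
--
--     for curStart in sorted(bcOrder.keys()):
--         if (curBc == ""):
--             curBc = bcOrder[curStart]['barcode']
--         if curBc != bcOrder[curStart]['barcode'] :
--             start = curStart
--             end = bcOrder[curStart]['end']
--             startList.append((start, end))
--             curBc = bcOrder[curStart]['barcode']
--
--     leftQual = None
--     rightQual = None
--
--     if len(startList) > 0: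
--         prevEnd = 0
--         for start, end in startList:
--             left = read[prevEnd:start]
--             if quality:
--                 leftQual = quality[prevEnd:start]
--             prevEnd = start
--             readList.append((left, leftQual))
--         right = read[prevEnd:]
--         rightQual = quality[prevEnd:]
--         readList.append((right, rightQual))
--     else :
--         readList.append((read, quality))
--
--     return readList
-- ===== SOURCE B (Python) =====
-- def splitByBarcodeChunk(read, bcOrder, quality=None):
--     def chunks(prev, cur, ks):
--         for i, k in enumerate(ks):
--             bc = bcOrder[k]['barcode']
--             if bc != cur:
--                 mid = quality[prev:k] if quality else None
--                 return [(read[prev:k], mid)] + chunks(k, bc, ks[i + 1:])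
--         return [(read[prev:], quality[prev:] if quality is not None else None)]
--
--     ks = sorted(bcOrder)
--     return chunks(0, bcOrder[ks[0]]['barcode'] if ks else None, ks)
-- ===== Notes on version B (the rewrite author's own statement) =====
-- stated objective: simpler
-- what changed: A's two sequential accumulator loops (first collect a startList of split positions via a '' curBc sentinel and 'end' lookups, then a second loop slicing read/quality with a leftover leftQual variable and a special empty-startList branch) are replaced by one fused recursive pass over the sorted keys that emits each segment the moment the barcode changes and needs no split list, no 'end' lookups, no leftQual threading and no empty-case branch.
-- intended difference: On inputs where, in sorted key order, a key whose barcode is '' is immediately followed by a key with a different (nonempty) barcode, A's ''-sentinel conflates the empty barcode with its initial state and silently omits that split (e.g. returns the read unsplit), while B splits at every barcode change, which is the intended behaviour. — e.g. on splitByBarcodeChunk("ab", [(0, [("barcode", "")]), (1, [("barcode", "x"), ("end", "e")])], some "AB"): A returns [("ab", some "AB")], B returns [("a", some "A"), ("b", some "B")]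
import Mathlib
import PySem

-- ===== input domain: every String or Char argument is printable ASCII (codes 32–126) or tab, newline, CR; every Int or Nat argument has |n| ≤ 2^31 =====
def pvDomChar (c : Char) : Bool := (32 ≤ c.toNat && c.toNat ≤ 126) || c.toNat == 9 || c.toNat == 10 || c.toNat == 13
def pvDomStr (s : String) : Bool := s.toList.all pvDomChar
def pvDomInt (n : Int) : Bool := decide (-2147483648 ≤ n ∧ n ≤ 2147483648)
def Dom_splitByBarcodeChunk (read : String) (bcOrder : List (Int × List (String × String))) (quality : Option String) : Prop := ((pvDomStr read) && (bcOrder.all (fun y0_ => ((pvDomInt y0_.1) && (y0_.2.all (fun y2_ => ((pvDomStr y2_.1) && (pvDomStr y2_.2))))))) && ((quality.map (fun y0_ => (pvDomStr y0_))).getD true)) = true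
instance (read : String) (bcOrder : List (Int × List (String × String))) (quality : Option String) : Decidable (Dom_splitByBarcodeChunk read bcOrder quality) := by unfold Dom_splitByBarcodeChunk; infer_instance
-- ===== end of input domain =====

-- B replaces A's two sequential accumulator loops (split-list collection with a '' sentinel, then a
-- slicing loop with leftover leftQual state and an empty-case branch) by one fused recursive pass
-- that emits each segment at the barcode change (objective: simpler; neither program mutates its inputs).

-- bcOrder[k]["barcode"] / ["end"]: first-match association-list lookup (exact: Python dict keys are unique);
-- the default is never reached inside Pre_ (Python raises KeyError on a missing key — excluded by Pre_).
def pvBcf (bcOrder : List (Int × List (String × String))) (k : Int) : String :=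
  (List.lookup "barcode" ((List.lookup k bcOrder).getD [])).getD ""
def pvEndf (bcOrder : List (Int × List (String × String))) (k : Int) : String :=
  (List.lookup "end" ((List.lookup k bcOrder).getD [])).getD ""

-- ===== PORT A =====
def splitByBarcodeChunk (read : String) (bcOrder : List (Int × List (String × String))) (quality : Option String) : List (String × Option String) :=
  -- sorted(bcOrder.keys())
  let keys := PySem.List.sorted (bcOrder.map Prod.fst) (fun k => k) false
  -- first loop: state (curBc, startList)
  let r1 := keys.foldl (fun (st : String × List (Int × String)) curStart =>
      let curBc := if st.1 = "" then pvBcf bcOrder curStart else st.1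
      if curBc ≠ pvBcf bcOrder curStart then
        (pvBcf bcOrder curStart, st.2 ++ [(curStart, pvEndf bcOrder curStart)])
      else (curBc, st.2)) ("", [])
  let startList := r1.2
  if startList.length > 0 then
    -- second loop: state (prevEnd, leftQual, readList); `if quality:` is string truthiness
    let fin := startList.foldl (fun (st : Int × Option String × List (String × Option String)) se =>
        let left := PySem.Str.slice read (some st.1) (some se.1)
        let leftQual := match quality with
          | some q => if q ≠ "" then some (PySem.Str.slice q (some st.1) (some se.1)) else st.2.1
          | none => st.2.1
        (se.1, leftQual, st.2.2 ++ [(left, leftQual)])) (0, none, [])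
    let right := PySem.Str.slice read (some fin.1) none
    -- quality[prevEnd:] is unconditional in A: Python raises TypeError when quality is None (excluded by Pre_)
    let rightQual := quality.map (fun q => PySem.Str.slice q (some fin.1) none)
    fin.2.2 ++ [(right, rightQual)]
  else [(read, quality)]

-- ===== PORT B =====
-- quality[prev:k] if quality else None  (string truthiness: some "" is falsy)
def pvQmid (quality : Option String) (a b : Int) : Option String :=
  match quality with
  | some q => if q ≠ "" then some (PySem.Str.slice q (some a) (some b)) else none
  | none => none

-- the recursive `chunks(prev, cur, ks)` of Source B: scan ks, at the first barcode change emit the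
-- segment and recurse on the remaining keys; at the end emit the final segment
-- (quality[prev:] if quality is not None else None)
def pvChunks (read : String) (bcOrder : List (Int × List (String × String))) (quality : Option String) : Int → String → List Int → List (String × Option String)
  | prev, _cur, [] =>
      [(PySem.Str.slice read (some prev) none,
        quality.map (fun q => PySem.Str.slice q (some prev) none))]
  | prev, cur, k :: t =>
      let bc := pvBcf bcOrder k
      if bc ≠ cur then
        (PySem.Str.slice read (some prev) (some k), pvQmid quality prev k)
          :: pvChunks read bcOrder quality k bc t
      else pvChunks read bcOrder quality prev cur t

def splitByBarcodeChunk_alt (read : String) (bcOrder : List (Int × List (String × String))) (quality : Option String) : List (String × Option String) :=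
  let ks := PySem.List.sorted (bcOrder.map Prod.fst) (fun k => k) false
  match ks with
  | [] => pvChunks read bcOrder quality 0 "" []        -- cur is unused on []; Python passes None
  | k :: _ => pvChunks read bcOrder quality 0 (pvBcf bcOrder k) ks

-- ===== PRECONDITION & SPEC =====
-- Pre_ excludes exactly the inputs on which A raises: a missing 'barcode' key (KeyError), a missing
-- 'end' key at a split position (KeyError), and quality None when A's startList is nonempty (TypeError).
def Pre_splitByBarcodeChunk (read : String) (bcOrder : List (Int × List (String × String))) (quality : Option String) : Prop :=
  (∀ kv ∈ bcOrder, "barcode" ∈ kv.2.map Prod.fst) ∧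
  (∀ kv1 ∈ bcOrder, ∀ kv2 ∈ bcOrder,
     (kv1.1 < kv2.1 ∧ (∀ kv3 ∈ bcOrder, ¬(kv1.1 < kv3.1 ∧ kv3.1 < kv2.1)) ∧
      (List.lookup "barcode" ((List.lookup kv1.1 bcOrder).getD [])).getD "" ≠ "" ∧
      (List.lookup "barcode" ((List.lookup kv1.1 bcOrder).getD [])).getD ""
        ≠ (List.lookup "barcode" ((List.lookup kv2.1 bcOrder).getD [])).getD "") →
     "end" ∈ kv2.2.map Prod.fst) ∧
  ((∃ kv1 ∈ bcOrder, ∃ kv2 ∈ bcOrder,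
      kv1.1 < kv2.1 ∧ (∀ kv3 ∈ bcOrder, ¬(kv1.1 < kv3.1 ∧ kv3.1 < kv2.1)) ∧
      (List.lookup "barcode" ((List.lookup kv1.1 bcOrder).getD [])).getD "" ≠ "" ∧
      (List.lookup "barcode" ((List.lookup kv1.1 bcOrder).getD [])).getD ""
        ≠ (List.lookup "barcode" ((List.lookup kv2.1 bcOrder).getD [])).getD "") → quality ≠ none)
instance (read : String) (bcOrder : List (Int × List (String × String))) (quality : Option String) : Decidable (Pre_splitByBarcodeChunk read bcOrder quality) := by unfold Pre_splitByBarcodeChunk; infer_instance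

def pvWitness_splitByBarcodeChunk : String × (List (Int × List (String × String))) × Option String :=
  ("abcd", [(0, [("barcode", "x"), ("end", "e")]), (2, [("barcode", "y"), ("end", "f")])], some "ABCD")

-- A's "" sentinel conflates an empty barcode with its initial state: on inputs where, in sorted key
-- order, a key with barcode "" is immediately followed by a key with a different (nonempty) barcode,
-- A silently omits that split; B splits at every barcode change, which is the intended behaviour.
def D_splitByBarcodeChunk (read : String) (bcOrder : List (Int × List (String × String))) (quality : Option String) : Prop :=
  ∃ kv1 ∈ bcOrder, ∃ kv2 ∈ bcOrder,
    kv1.1 < kv2.1 ∧ (∀ kv3 ∈ bcOrder, ¬(kv1.1 < kv3.1 ∧ kv3.1 < kv2.1)) ∧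
    (List.lookup "barcode" ((List.lookup kv1.1 bcOrder).getD [])).getD "" = "" ∧
    (List.lookup "barcode" ((List.lookup kv2.1 bcOrder).getD [])).getD "" ≠ ""
instance (read : String) (bcOrder : List (Int × List (String × String))) (quality : Option String) : Decidable (D_splitByBarcodeChunk read bcOrder quality) := by unfold D_splitByBarcodeChunk; infer_instance

def Spec_splitByBarcodeChunk (read : String) (bcOrder : List (Int × List (String × String))) (quality : Option String) (out : List (String × Option String)) : Prop := ¬ D_splitByBarcodeChunk read bcOrder quality → out = splitByBarcodeChunk_alt read bcOrder quality
instance (read : String) (bcOrder : List (Int × List (String × String))) (quality : Option String) (out : List (String × Option String)) : Decidable (Spec_splitByBarcodeChunk read bcOrder quality out) := by unfold Spec_splitByBarcodeChunk; infer_instance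

def pvDiffWitness_splitByBarcodeChunk : String × (List (Int × List (String × String))) × Option String :=
  ("ab", [(0, [("barcode", "")]), (1, [("barcode", "x"), ("end", "e")])], some "AB")
def pvDiffWitnessOut_splitByBarcodeChunk : (List (String × Option String)) × (List (String × Option String)) :=
  ([("ab", some "AB")], [("a", some "A"), ("b", some "B")])

-- ===== CLAIM (what is proved, stated in full; the proofs are below) =====
def Claim_unchanged_splitByBarcodeChunk : Prop := ∀ (read : String) (bcOrder : List (Int × List (String × String))) (quality : Option String), Dom_splitByBarcodeChunk read bcOrder quality → Pre_splitByBarcodeChunk read bcOrder quality → Spec_splitByBarcodeChunk read bcOrder quality (splitByBarcodeChunk read bcOrder quality)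
def Claim_changed_splitByBarcodeChunk : Prop := Dom_splitByBarcodeChunk (pvDiffWitness_splitByBarcodeChunk.1) (pvDiffWitness_splitByBarcodeChunk.2.1) (pvDiffWitness_splitByBarcodeChunk.2.2) ∧ Pre_splitByBarcodeChunk (pvDiffWitness_splitByBarcodeChunk.1) (pvDiffWitness_splitByBarcodeChunk.2.1) (pvDiffWitness_splitByBarcodeChunk.2.2) ∧ D_splitByBarcodeChunk (pvDiffWitness_splitByBarcodeChunk.1) (pvDiffWitness_splitByBarcodeChunk.2.1) (pvDiffWitness_splitByBarcodeChunk.2.2) ∧ splitByBarcodeChunk (pvDiffWitness_splitByBarcodeChunk.1) (pvDiffWitness_splitByBarcodeChunk.2.1) (pvDiffWitness_splitByBarcodeChunk.2.2) = pvDiffWitnessOut_splitByBarcodeChunk.1 ∧ splitByBarcodeChunk_alt (pvDiffWitness_splitByBarcodeChunk.1) (pvDiffWitness_splitByBarcodeChunk.2.1) (pvDiffWitness_splitByBarcodeChunk.2.2) = pvDiffWitnessOut_splitByBarcodeChunk.2 ∧ pvDiffWitnessOut_splitByBarcodeChunk.1 ≠ pvDiffWitnessOut_splitByBarcodeChunk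.2
def Claim_exact_splitByBarcodeChunk : Prop := ∀ (read : String) (bcOrder : List (Int × List (String × String))) (quality : Option String), Dom_splitByBarcodeChunk read bcOrder quality → Pre_splitByBarcodeChunk read bcOrder quality → D_splitByBarcodeChunk read bcOrder quality → splitByBarcodeChunk read bcOrder quality ≠ splitByBarcodeChunk_alt read bcOrder quality

-- ===== LEMMAS AND PROOFS =====

-- A's first loop, characterised: split list and final curBc
def pvSplitsA (bcOrder : List (Int × List (String × String))) (c : String) : List Int → List (Int × String)
  | [] => []
  | k :: t => (if (if c = "" then pvBcf bcOrder k else c) ≠ pvBcf bcOrder k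
               then [(k, pvEndf bcOrder k)] else []) ++ pvSplitsA bcOrder (pvBcf bcOrder k) t
def pvLastBc (bcOrder : List (Int × List (String × String))) (c : String) : List Int → String
  | [] => c
  | k :: t => pvLastBc bcOrder (pvBcf bcOrder k) t
lemma foldA_eq (bcOrder : List (Int × List (String × String))) (t : List Int) :
    ∀ (c : String) (acc : List (Int × String)),
    t.foldl (fun (st : String × List (Int × String)) curStart =>
      let curBc := if st.1 = "" then pvBcf bcOrder curStart else st.1
      if curBc ≠ pvBcf bcOrder curStart then
        (pvBcf bcOrder curStart, st.2 ++ [(curStart, pvEndf bcOrder curStart)])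
      else (curBc, st.2)) (c, acc)
    = (pvLastBc bcOrder c t, acc ++ pvSplitsA bcOrder c t) := by
  induction t with
  | nil => intro c acc; simp [pvLastBc, pvSplitsA]
  | cons k t ih =>
    intro c acc
    rw [List.foldl_cons]
    dsimp only
    by_cases h : (if c = "" then pvBcf bcOrder k else c) ≠ pvBcf bcOrder k
    · rw [if_pos h, ih, pvSplitsA, pvLastBc, if_pos h]; simp
    · rw [if_neg h, ih, pvSplitsA, pvLastBc, if_neg h]
      rw [not_ne_iff] at h
      rw [h]; simp

-- split positions without the sentinel (B's rule), and "the sentinel matters" flag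
def pvSplitsB (bcOrder : List (Int × List (String × String))) (c : String) : List Int → List Int
  | [] => []
  | k :: t => (if c ≠ pvBcf bcOrder k then [k] else []) ++ pvSplitsB bcOrder (pvBcf bcOrder k) t
def pvET (bcOrder : List (Int × List (String × String))) (c : String) : List Int → Bool
  | [] => false
  | k :: t => (c == "" && pvBcf bcOrder k != "") || pvET bcOrder (pvBcf bcOrder k) t

lemma ET_false (bcOrder : List (Int × List (String × String))) (t : List Int) :
    ∀ (k : Int), (∀ p ∈ (k :: t).zip t, ¬(pvBcf bcOrder p.1 = "" ∧ pvBcf bcOrder p.2 ≠ "")) →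
    pvET bcOrder (pvBcf bcOrder k) t = false := by
  induction t with
  | nil => intro k _; rfl
  | cons k2 t ih =>
    intro k h
    rw [pvET, Bool.or_eq_false_iff]
    constructor
    · have := h (k, k2) (by simp [List.zip_cons_cons])
      simp only [not_and, not_not] at this
      by_cases hk : pvBcf bcOrder k = ""
      · simp [hk, this hk]
      · simp [hk]
    · exact ih k2 (fun p hp => h p (by simp [List.zip_cons_cons]; right; simpa using hp))

lemma ET_true (bcOrder : List (Int × List (String × String))) (t : List Int) :
    ∀ (k : Int), (∃ p ∈ (k :: t).zip t, pvBcf bcOrder p.1 = "" ∧ pvBcf bcOrder p.2 ≠ "") →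
    pvET bcOrder (pvBcf bcOrder k) t = true := by
  induction t with
  | nil => intro k h; simp at h
  | cons k2 t ih =>
    intro k h
    rw [pvET, Bool.or_eq_true]
    rcases h with ⟨p, hp, h1, h2⟩
    rw [List.zip_cons_cons, List.mem_cons] at hp
    rcases hp with rfl | hp
    · left; simp [h1, h2]
    · right; exact ih k2 ⟨p, hp, h1, h2⟩

lemma splits_eq (bcOrder : List (Int × List (String × String))) (t : List Int) :
    ∀ (c : String), pvET bcOrder c t = false →
    (pvSplitsA bcOrder c t).map Prod.fst = pvSplitsB bcOrder c t := by
  induction t with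
  | nil => intro c _; rfl
  | cons k t ih =>
    intro c h
    rw [pvET, Bool.or_eq_false_iff] at h
    obtain ⟨h1, h2⟩ := h
    rw [pvSplitsA, pvSplitsB, List.map_append, ih _ h2]
    congr 1
    by_cases hc : c = ""
    · simp only [Bool.and_eq_false_iff] at h1
      rcases h1 with h1 | h1
      · simp [hc] at h1
      · have : pvBcf bcOrder k = "" := by simpa using h1
        simp [hc, this]
    · by_cases he : c = pvBcf bcOrder k <;> simp [hc, he]

-- A's second loop, characterised
def pvSegs (read : String) (quality : Option String) (p : Int) (m : Option String) : List Int → List (String × Option String)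
  | [] => []
  | s :: t =>
    (PySem.Str.slice read (some p) (some s),
     match quality with
     | some q => if q ≠ "" then some (PySem.Str.slice q (some p) (some s)) else m
     | none => m) ::
    pvSegs read quality s
      (match quality with
       | some q => if q ≠ "" then some (PySem.Str.slice q (some p) (some s)) else m
       | none => m) t
def pvMid (quality : Option String) (p : Int) (m : Option String) : List Int → Option String
  | [] => m
  | s :: t => pvMid quality s
      (match quality with
       | some q => if q ≠ "" then some (PySem.Str.slice q (some p) (some s)) else m
       | none => m) t

lemma foldSeg_eq (read : String) (quality : Option String) (lst : List (Int × String)) :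
    ∀ (p : Int) (m : Option String) (acc : List (String × Option String)),
    lst.foldl (fun (st : Int × Option String × List (String × Option String)) se =>
        let left := PySem.Str.slice read (some st.1) (some se.1)
        let leftQual := match quality with
          | some q => if q ≠ "" then some (PySem.Str.slice q (some st.1) (some se.1)) else st.2.1
          | none => st.2.1
        (se.1, leftQual, st.2.2 ++ [(left, leftQual)])) (p, m, acc)
    = ((lst.map Prod.fst).getLastD p, pvMid quality p m (lst.map Prod.fst),
       acc ++ pvSegs read quality p m (lst.map Prod.fst)) := by
  induction lst with
  | nil => intro p m acc; simp [pvMid, pvSegs]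
  | cons se lst ih =>
    intro p m acc
    rw [List.foldl_cons]
    dsimp only
    rw [ih]
    simp only [List.map_cons, List.getLastD_cons, pvMid, pvSegs]
    simp

lemma pvSegs_irrel (read q : String) (hq : q ≠ "") (t : List Int) :
    ∀ (p : Int) (m m' : Option String),
    pvSegs read (some q) p m t = pvSegs read (some q) p m' t := by
  induction t with
  | nil => intro p m m'; rfl
  | cons s t ih =>
    intro p m m'
    simp only [pvSegs, hq, if_pos, ne_eq, not_false_iff]

-- B's chunks, characterised through its split positions
def pvSegsOf (read : String) (quality : Option String) : Int → List Int → List (String × Option String)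
  | prev, [] =>
      [(PySem.Str.slice read (some prev) none,
        quality.map (fun q => PySem.Str.slice q (some prev) none))]
  | prev, s :: ss =>
      (PySem.Str.slice read (some prev) (some s), pvQmid quality prev s) :: pvSegsOf read quality s ss

lemma chunks_eq (read : String) (bcOrder : List (Int × List (String × String))) (quality : Option String) (t : List Int) :
    ∀ (cur : String) (prev : Int),
    pvChunks read bcOrder quality prev cur t = pvSegsOf read quality prev (pvSplitsB bcOrder cur t) := by
  induction t with
  | nil => intro cur prev; rfl
  | cons k t ih =>
    intro cur prev
    rw [pvChunks, pvSplitsB]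
    by_cases h : pvBcf bcOrder k ≠ cur
    · rw [if_pos h, if_pos (fun he => h he.symm), ih]
      rfl
    · rw [if_neg h, if_neg (fun he => h he.symm), ih]
      rw [not_ne_iff] at h
      rw [h, List.nil_append]

lemma segsOf_decomp (read : String) (quality : Option String) (ss : List Int) :
    ∀ (prev : Int),
    pvSegsOf read quality prev ss
    = pvSegs read quality prev none ss
      ++ [(PySem.Str.slice read (some (ss.getLastD prev)) none,
           quality.map (fun q => PySem.Str.slice q (some (ss.getLastD prev)) none))] := by
  induction ss with
  | nil => intro prev; rfl
  | cons s ss ih =>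
    intro prev
    rw [pvSegsOf, ih s, List.getLastD_cons]
    rcases quality with _ | q
    · simp [pvSegs, pvQmid]
    · by_cases hq : q = ""
      · subst hq; simp [pvSegs, pvQmid]
      · simp only [pvSegs, pvQmid, hq, ne_eq, not_false_iff, if_pos, List.cons_append,
          List.cons.injEq, true_and]
        rw [pvSegs_irrel read q hq ss s (some (PySem.Str.slice q (some prev) (some s))) none]

-- adjacency in a sorted list vs membership in its zip with its tail
lemma pvAdj_of_zip (L : List Int) (hpw : L.Pairwise (· ≤ ·)) :
    ∀ a b : Int, (a, b) ∈ L.zip L.tail → a ≠ b →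
    a ∈ L ∧ b ∈ L ∧ a < b ∧ ∀ c ∈ L, ¬(a < c ∧ c < b) := by
  induction L with
  | nil => intro a b h; simp at h
  | cons x rest ih =>
    intro a b hab hne
    cases rest with
    | nil => simp at hab
    | cons y rest' =>
      rw [List.tail_cons, List.zip_cons_cons, List.mem_cons] at hab
      rw [List.pairwise_cons] at hpw
      rcases hab with h | h
      · obtain ⟨rfl, rfl⟩ := Prod.mk.injEq .. ▸ h
        have hxy : a ≤ b := hpw.1 b (by simp)
        refine ⟨by simp, by simp, lt_of_le_of_ne hxy hne, ?_⟩
        intro c hc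
        rcases List.mem_cons.mp hc with rfl | hc
        · exact fun h => absurd h.1 (lt_irrefl _)
        · have hbc : b ≤ c := by
            rcases List.mem_cons.mp hc with rfl | hc'
            · exact le_refl _
            · exact (List.pairwise_cons.mp hpw.2).1 c hc'
          exact fun h => absurd (lt_of_lt_of_le h.2 hbc) (lt_irrefl _)
      · have hzip : (a, b) ∈ (y :: rest').zip (y :: rest').tail := by simpa using h
        obtain ⟨ha, hb, hlt, hno⟩ := ih hpw.2 a b hzip hne
        refine ⟨List.mem_cons_of_mem _ ha, List.mem_cons_of_mem _ hb, hlt, ?_⟩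
        intro c hc
        rcases List.mem_cons.mp hc with rfl | hc
        · have : c ≤ a := hpw.1 a ha
          exact fun h => absurd (lt_of_le_of_lt this h.1) (lt_irrefl _)
        · exact hno c hc

lemma pvZip_of_adj (L : List Int) (hpw : L.Pairwise (· ≤ ·)) :
    ∀ a b : Int, a ∈ L → b ∈ L → a < b → (∀ c ∈ L, ¬(a < c ∧ c < b)) →
    (a, b) ∈ L.zip L.tail := by
  induction L with
  | nil => intro a b ha; simp at ha
  | cons x rest ih =>
    intro a b ha hb hab hno
    rw [List.pairwise_cons] at hpw
    have hbx : b ≠ x := by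
      rintro rfl
      rcases List.mem_cons.mp ha with rfl | ha'
      · exact absurd hab (lt_irrefl _)
      · exact absurd (lt_of_le_of_lt (hpw.1 a ha') hab) (lt_irrefl _)
    have hbrest : b ∈ rest := (List.mem_cons.mp hb).resolve_left hbx
    cases rest with
    | nil => simp at hbrest
    | cons y rest' =>
      rw [List.tail_cons, List.zip_cons_cons]
      rcases List.mem_cons.mp ha with rfl | harest
      · by_cases hyb : y = b
        · subst hyb; exact List.mem_cons_self ..
        · have hyble : y ≤ b := by
            rcases List.mem_cons.mp hbrest with rfl | hb'
            · exact le_refl _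
            · exact (List.pairwise_cons.mp hpw.2).1 b hb'
          have hyB : y < b := lt_of_le_of_ne hyble hyb
          have hya : y ≤ a := by
            have := hno y (by simp)
            rcases lt_or_ge a y with hlt | hge
            · exact absurd ⟨hlt, hyB⟩ this
            · exact hge
          have hay : a ≤ y := hpw.1 y (by simp)
          have : a = y := le_antisymm hay hya
          subst this
          have := ih hpw.2 a b (by simp) hbrest hab
            (fun c hc => hno c (List.mem_cons_of_mem _ hc))
          exact List.mem_cons_of_mem _ (by simpa using this)
      · have := ih hpw.2 a b harest hbrest hab
          (fun c hc => hno c (List.mem_cons_of_mem _ hc))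
        exact List.mem_cons_of_mem _ (by simpa using this)

theorem pv_main (read : String) (bcOrder : List (Int × List (String × String))) (quality : Option String) :
    ¬ D_splitByBarcodeChunk read bcOrder quality →
    splitByBarcodeChunk read bcOrder quality = splitByBarcodeChunk_alt read bcOrder quality := by
  intro hD
  rw [splitByBarcodeChunk, splitByBarcodeChunk_alt]
  have hpw : (PySem.List.sorted (bcOrder.map Prod.fst) (fun k => k) false).Pairwise (· ≤ ·) :=
    by simpa using PySem.List.sorted_pairwise (bcOrder.map Prod.fst) (fun k => k)
  have hmem : ∀ x : Int, x ∈ PySem.List.sorted (bcOrder.map Prod.fst) (fun k => k) false ↔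
      x ∈ bcOrder.map Prod.fst := fun x => PySem.List.mem_sorted (bcOrder.map Prod.fst) (fun k => k) false x
  generalize hk : PySem.List.sorted (bcOrder.map Prod.fst) (fun k => k) false = keys at hpw hmem ⊢
  cases keys with
  | nil => simp [pvChunks, PySem.Str.slice]
  | cons k t =>
    dsimp only
    rw [foldA_eq bcOrder (k :: t) "" []]
    have hA0 : pvSplitsA bcOrder "" (k :: t) = pvSplitsA bcOrder (pvBcf bcOrder k) t := by
      simp [pvSplitsA]
    rw [hA0, List.nil_append]
    have hBstep : pvChunks read bcOrder quality 0 (pvBcf bcOrder k) (k :: t)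
        = pvSegsOf read quality 0 (pvSplitsB bcOrder (pvBcf bcOrder k) t) := by
      rw [chunks_eq, pvSplitsB]
      simp
    rw [hBstep]
    have hET : pvET bcOrder (pvBcf bcOrder k) t = false := by
      apply ET_false
      intro p hp hcon
      have hne : p.1 ≠ p.2 := fun h => hcon.2 (h ▸ hcon.1)
      obtain ⟨ha, hb, hlt', hno⟩ := pvAdj_of_zip (k :: t) hpw p.1 p.2 (by simpa using hp) hne
      apply hD
      obtain ⟨kv1, hkv1, hk1⟩ := List.mem_map.mp ((hmem p.1).mp ha)
      obtain ⟨kv2, hkv2, hk2⟩ := List.mem_map.mp ((hmem p.2).mp hb)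
      refine ⟨kv1, hkv1, kv2, hkv2, by rw [hk1, hk2]; exact hlt', ?_, ?_, ?_⟩
      · intro kv3 h3
        rw [hk1, hk2]
        exact hno kv3.1 ((hmem kv3.1).mpr (List.mem_map_of_mem h3))
      · rw [hk1]; exact hcon.1
      · rw [hk2]; exact hcon.2
    have hsp : (pvSplitsA bcOrder (pvBcf bcOrder k) t).map Prod.fst
        = pvSplitsB bcOrder (pvBcf bcOrder k) t := splits_eq bcOrder t _ hET
    by_cases hnil : pvSplitsA bcOrder (pvBcf bcOrder k) t = []
    · have hB : pvSplitsB bcOrder (pvBcf bcOrder k) t = [] := by rw [← hsp, hnil]; rfl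
      rw [hnil, hB]
      rw [if_neg (by simp)]
      rw [pvSegsOf]
      rcases quality with _ | q
      · simp [PySem.Str.slice]
      · simp [PySem.Str.slice]
    · have hlen : (pvSplitsA bcOrder (pvBcf bcOrder k) t).length > 0 := List.length_pos_iff.mpr hnil
      rw [if_pos hlen]
      rw [foldSeg_eq read quality (pvSplitsA bcOrder (pvBcf bcOrder k) t) 0 none [], hsp]
      rw [segsOf_decomp, List.nil_append]

lemma splits_len_mono (bcOrder : List (Int × List (String × String))) (t : List Int) :
    ∀ c, (pvSplitsA bcOrder c t).length ≤ (pvSplitsB bcOrder c t).length := by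
  induction t with
  | nil => intro c; simp [pvSplitsA, pvSplitsB]
  | cons k t ih =>
    intro c
    rw [pvSplitsA, pvSplitsB, List.length_append, List.length_append]
    have h2 := ih (pvBcf bcOrder k)
    have h1 : (if (if c = "" then pvBcf bcOrder k else c) ≠ pvBcf bcOrder k
               then [(k, pvEndf bcOrder k)] else []).length ≤ (if c ≠ pvBcf bcOrder k then [k] else []).length := by
      by_cases hc : c = ""
      · simp [hc]
      · by_cases he : c = pvBcf bcOrder k <;> simp [hc, he]
    omega

lemma splits_len_lt (bcOrder : List (Int × List (String × String))) (t : List Int) :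
    ∀ c, pvET bcOrder c t = true → (pvSplitsA bcOrder c t).length < (pvSplitsB bcOrder c t).length := by
  induction t with
  | nil => intro c h; simp [pvET] at h
  | cons k t ih =>
    intro c h
    rw [pvET, Bool.or_eq_true] at h
    rw [pvSplitsA, pvSplitsB, List.length_append, List.length_append]
    rcases h with h | h
    · have hc : c = "" ∧ pvBcf bcOrder k ≠ "" := by
        constructor
        · have := (Bool.and_eq_true _ _).mp h |>.1; simpa using this
        · have := (Bool.and_eq_true _ _).mp h |>.2; simpa using this
      have hmono := splits_len_mono bcOrder t (pvBcf bcOrder k)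
      have hA : (if (if c = "" then pvBcf bcOrder k else c) ≠ pvBcf bcOrder k
               then [(k, pvEndf bcOrder k)] else []).length = 0 := by simp [hc.1]
      have hB : (if c ≠ pvBcf bcOrder k then [k] else []).length = 1 := by
        rw [if_pos]; · rfl
        · rw [hc.1]; exact fun he => hc.2 he.symm
      omega
    · have hlt := ih _ h
      have h1 : (if (if c = "" then pvBcf bcOrder k else c) ≠ pvBcf bcOrder k
               then [(k, pvEndf bcOrder k)] else []).length ≤ (if c ≠ pvBcf bcOrder k then [k] else []).length := by
        by_cases hc : c = ""
        · simp [hc]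
        · by_cases he : c = pvBcf bcOrder k <;> simp [hc, he]
      omega

lemma pvSegs_len (read : String) (quality : Option String) (ss : List Int) :
    ∀ p m, (pvSegs read quality p m ss).length = ss.length := by
  induction ss with
  | nil => intro p m; rfl
  | cons s t ih => intro p m; rw [pvSegs.eq_def]; simp [ih]

lemma pvSegsOf_len (read : String) (quality : Option String) (ss : List Int) :
    ∀ p, (pvSegsOf read quality p ss).length = ss.length + 1 := by
  induction ss with
  | nil => intro p; rfl
  | cons s t ih => intro p; rw [pvSegsOf]; simp [ih]

theorem pv_tight (read : String) (bcOrder : List (Int × List (String × String))) (quality : Option String) :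
    D_splitByBarcodeChunk read bcOrder quality →
    splitByBarcodeChunk read bcOrder quality ≠ splitByBarcodeChunk_alt read bcOrder quality := by
  intro hD
  rw [splitByBarcodeChunk, splitByBarcodeChunk_alt]
  have hpw : (PySem.List.sorted (bcOrder.map Prod.fst) (fun k => k) false).Pairwise (· ≤ ·) :=
    by simpa using PySem.List.sorted_pairwise (bcOrder.map Prod.fst) (fun k => k)
  have hmem : ∀ x : Int, x ∈ PySem.List.sorted (bcOrder.map Prod.fst) (fun k => k) false ↔
      x ∈ bcOrder.map Prod.fst := fun x => PySem.List.mem_sorted (bcOrder.map Prod.fst) (fun k => k) false x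
  obtain ⟨kv1, hkv1, kv2, hkv2, hklt, hno, hbc1, hbc2⟩ := hD
  have hzip : (kv1.1, kv2.1) ∈ (PySem.List.sorted (bcOrder.map Prod.fst) (fun k => k) false).zip
      (PySem.List.sorted (bcOrder.map Prod.fst) (fun k => k) false).tail :=
    pvZip_of_adj _ hpw kv1.1 kv2.1 ((hmem _).mpr (List.mem_map_of_mem hkv1))
      ((hmem _).mpr (List.mem_map_of_mem hkv2)) hklt
      (fun c hc hcc => by
        obtain ⟨kv3, h3, hk3⟩ := List.mem_map.mp ((hmem c).mp hc)
        exact hno kv3 h3 (by rw [hk3]; exact hcc))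
  generalize hk : PySem.List.sorted (bcOrder.map Prod.fst) (fun k => k) false = keys at hzip ⊢
  cases keys with
  | nil => simp at hzip
  | cons k t =>
    dsimp only
    rw [foldA_eq bcOrder (k :: t) "" []]
    have hA0 : pvSplitsA bcOrder "" (k :: t) = pvSplitsA bcOrder (pvBcf bcOrder k) t := by
      simp [pvSplitsA]
    rw [hA0, List.nil_append]
    have hBstep : pvChunks read bcOrder quality 0 (pvBcf bcOrder k) (k :: t)
        = pvSegsOf read quality 0 (pvSplitsB bcOrder (pvBcf bcOrder k) t) := by
      rw [chunks_eq, pvSplitsB]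
      simp
    rw [hBstep]
    have hET : pvET bcOrder (pvBcf bcOrder k) t = true :=
      ET_true bcOrder t k ⟨(kv1.1, kv2.1), by simpa using hzip, hbc1, hbc2⟩
    have hlt := splits_len_lt bcOrder t _ hET
    intro heq
    have hlen := congrArg List.length heq
    by_cases hnil : pvSplitsA bcOrder (pvBcf bcOrder k) t = []
    · rw [hnil] at hlt
      simp only [List.length_nil] at hlt
      rw [hnil, if_neg (by simp)] at hlen
      have hlenB := pvSegsOf_len read quality (pvSplitsB bcOrder (pvBcf bcOrder k) t) 0
      simp only [List.length_singleton] at hlen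
      omega
    · rw [if_pos (List.length_pos_iff.mpr hnil)] at hlen
      rw [foldSeg_eq read quality (pvSplitsA bcOrder (pvBcf bcOrder k) t) 0 none [],
        List.nil_append] at hlen
      simp only [List.length_append, pvSegs_len, List.length_map, List.length_singleton,
        pvSegsOf_len] at hlen
      omega

-- ===== VERDICT (by name: the statement is the Claim_ definition above) =====
theorem splitByBarcodeChunk_spec : Claim_unchanged_splitByBarcodeChunk := by
  intro read bcOrder quality _ _ hD
  exact pv_main read bcOrder quality hD

theorem splitByBarcodeChunk_changed : Claim_changed_splitByBarcodeChunk := by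
  unfold Claim_changed_splitByBarcodeChunk; decide

theorem splitByBarcodeChunk_tight : Claim_exact_splitByBarcodeChunk := by
  intro read bcOrder quality _ _ hD
  exact pv_tight read bcOrder quality hD
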